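-- pv_equiv track=rewrite | github.com/searsam1/theEdabitProject | Python/m7mJib8kvoyDXgk4i/code.py | max_sum
-- ===== SOURCE A (Python) =====
-- def max_sum(nums):
--
--     sums = []
--     res = []
--     for n in nums:
--         res.append(n)
--         if sum(res) < 0:
--             sums.append(res)
--             res = []
--
--     sums.append(res)
--
--     lst = []
--     for res in sums:
--         r = []
--         for idx,i in enumerate(res):
--             if idx == 0 or idx == len(res) - 1:
--                 if i > 0:
--                     r.append(i)
--             else:
--                 r.append(i)
--         lst.append(r)
--     return sum(max(lst, key=sum))
-- ===== SOURCE B (Python) =====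
-- def _trim(first, last, s, k):
--     # trimmed sum of a group summarised by (first elem, last elem, sum, length)
--     if k == 0:
--         return 0
--     if k == 1:
--         return first if first > 0 else 0
--     t = s
--     if first <= 0:
--         t -= first
--     if last <= 0:
--         t -= last
--     return t
--
--
-- def max_sum(nums):
--     best = None
--     first = last = s = k = 0
--     for n in nums:
--         if k == 0:
--             first = n
--         last = n
--         s += n
--         k += 1
--         if s < 0:
--             t = _trim(first, last, s, k)
--             if best is None or t > best:
--                 best = t
--             first = last = s = k = 0
--     t = _trim(first, last, s, k)
--     if best is None or t > best:
--         best = t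
--     return best
-- ===== Notes on version B (the rewrite author's own statement) =====
-- stated objective: faster
-- what changed: Single O(1)-space streaming pass that keeps a running sum plus a (first,last,sum,length) summary per group and folds a running maximum of trimmed sums, instead of re-summing the growing group with sum(res) on every element (quadratic), materialising all groups, re-trimming each into a new list and calling max(key=sum).
import Mathlib
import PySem

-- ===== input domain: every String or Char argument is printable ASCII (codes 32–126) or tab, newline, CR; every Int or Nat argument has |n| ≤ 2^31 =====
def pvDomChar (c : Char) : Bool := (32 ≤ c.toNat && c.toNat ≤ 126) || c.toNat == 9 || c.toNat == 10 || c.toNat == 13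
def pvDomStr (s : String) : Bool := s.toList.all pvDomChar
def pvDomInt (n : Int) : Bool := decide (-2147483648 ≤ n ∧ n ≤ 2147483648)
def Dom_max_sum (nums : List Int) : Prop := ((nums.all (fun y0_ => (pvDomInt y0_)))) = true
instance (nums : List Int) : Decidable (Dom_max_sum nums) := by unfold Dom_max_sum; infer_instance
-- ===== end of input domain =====

-- B replaces A's quadratic split (re-summing the growing group with sum(res) each step,
-- then re-trimming every group into a new list and max(key=sum)) by one linear streaming
-- pass over (first,last,sum,length) group summaries with a running maximum; objective: faster.


-- ===== PORT A =====
-- the inner 'for idx,i in enumerate(res)' trimming loop of A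
def pyTrim (res : List Int) : List Int :=
  (PySem.List.enumerate res 0).foldl
    (fun r p =>
      if p.1 = 0 ∨ p.1 = (res.length : Int) - 1 then
        (if p.2 > 0 then r ++ [p.2] else r)
      else r ++ [p.2]) []

-- the body of A's first 'for n in nums' loop (state: sums, res)
def stepA (st : List (List Int) × List Int) (n : Int) : List (List Int) × List Int :=
  let res := st.2 ++ [n]
  if res.sum < 0 then (st.1 ++ [res], ([] : List Int)) else (st.1, res)

def max_sum (nums : List Int) : Int :=
  let st := nums.foldl stepA (([] : List (List Int)), ([] : List Int))
  let sums := st.1 ++ [st.2]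
  let lst := sums.foldl (fun lst res => lst ++ [pyTrim res]) []
  match PySem.List.max? lst (fun r => r.sum) with
  | some m => m.sum
  | none => 0   -- unreachable: lst is never empty (sums always holds at least one group)

-- ===== PORT B =====
-- Source B's _trim: trimmed sum of a group summarised by (first, last, sum, length)
def trimVal (first last s k : Int) : Int :=
  if k = 0 then 0
  else if k = 1 then (if first > 0 then first else 0)
  else
    let t := s
    let t := if first ≤ 0 then t - first else t
    let t := if last ≤ 0 then t - last else t
    t

-- Source B's 'if best is None or t > best: best = t'
def bUpd (best : Option Int) (t : Int) : Option Int :=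
  match best with
  | none => some t
  | some b => if t > b then some t else some b

-- the body of Source B's 'for n in nums' loop (state: best, first, last, s, k)
def stepB (st : Option Int × Int × Int × Int × Int) (n : Int) :
    Option Int × Int × Int × Int × Int :=
  let (best, first, _last, s, k) := st
  let first := if k = 0 then n else first
  let last := n
  let s := s + n
  let k := k + 1
  if s < 0 then (bUpd best (trimVal first last s k), 0, 0, 0, 0)
  else (best, first, last, s, k)

def max_sum_alt (nums : List Int) : Int :=
  let st := nums.foldl stepB (none, 0, 0, 0, 0)
  match bUpd st.1 (trimVal st.2.1 st.2.2.1 st.2.2.2.1 st.2.2.2.2) with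
  | some b => b
  | none => 0   -- unreachable: bUpd never returns none

-- ===== PRECONDITION & SPEC =====
def Spec_max_sum (nums : List Int) (out : Int) : Prop := out = max_sum_alt nums
instance (nums : List Int) (out : Int) : Decidable (Spec_max_sum nums out) := by unfold Spec_max_sum; infer_instance

-- ===== CLAIM (what is proved, stated in full; the proofs are below) =====
def Claim_equal_max_sum : Prop := ∀ (nums : List Int), Dom_max_sum nums → Spec_max_sum nums (max_sum nums)

-- ===== LEMMAS AND PROOFS =====

-- the summary B keeps for A's pending group res
def summ (res : List Int) : Int × Int × Int × Int :=
  (res.headD 0, res.getLastD 0, res.sum, (res.length : Int))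

-- the running maximum B keeps for A's closed groups gs
def bestOf (gs : List (List Int)) : Option Int :=
  gs.foldl (fun b g => bUpd b (pyTrim g).sum) none

theorem bUpd_some (b t : Int) : bUpd (some b) t = some (max b t) := by
  simp only [bUpd]
  rcases lt_or_ge b t with h | h
  · simp [h, max_eq_right h.le]
  · simp [max_eq_left h, show ¬ t > b from not_lt.mpr h]

theorem foldl_bUpd_some (l : List Int) (b : Int) :
    l.foldl bUpd (some b) = some (l.foldl max b) := by
  induction l generalizing b with
  | nil => rfl
  | cons x t ih => simp [List.foldl_cons, bUpd_some, ih]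

-- A's trimming loop is an if-filter over the enumeration
theorem pyTrim_filter (g : List Int) :
    pyTrim g = ((PySem.List.enumerate g 0).filter
      (fun p => !(decide (p.1 = 0 ∨ p.1 = (g.length : Int) - 1) && decide (p.2 ≤ 0)))).map Prod.snd := by
  unfold pyTrim
  rw [PySem.List.foldl_congr_mem (g := fun r (p : Int × Int) =>
    if (!(decide (p.1 = 0 ∨ p.1 = (g.length : Int) - 1) && decide (p.2 ≤ 0))) = true
    then r ++ [p.2] else r)]
  · rw [PySem.List.foldl_append_if]; simp
  · intro acc p _
    by_cases h1 : p.1 = 0 ∨ p.1 = (g.length : Int) - 1 <;> by_cases h2 : p.2 ≤ 0 <;>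
      simp [h1, h2]

-- sum of A's trimmed list = B's _trim of the group summary
theorem pyTrim_sum (g : List Int) :
    (pyTrim g).sum = trimVal (g.headD 0) (g.getLastD 0) g.sum (g.length : Int) := by
  rw [pyTrim_filter]
  match g with
  | [] => simp [PySem.List.enumerate, trimVal]
  | a :: t =>
    rcases t.eq_nil_or_concat with rfl | ⟨mid, b, rfl⟩
    · by_cases h : a ≤ 0 <;>
        simp [PySem.List.enumerate_cons, PySem.List.enumerate_nil, List.filter, h, trimVal]
    · simp only [List.concat_eq_append]
      have hlen : ((a :: (mid ++ [b])).length : Int) = (mid.length : Int) + 2 := by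
        simp; omega
      have hmid : ∀ p ∈ PySem.List.enumerate mid 1,
          (!(decide (p.1 = 0 ∨ p.1 = ((a :: (mid ++ [b])).length : Int) - 1) && decide (p.2 ≤ 0))) = true := by
        intro p hp
        rw [PySem.List.mem_enumerate_iff] at hp
        obtain ⟨k, hk, rfl⟩ := hp
        simp only [hlen]
        have h0 : (1 : Int) + k ≠ 0 := by omega
        have h1 : (1 : Int) + k ≠ (mid.length : Int) + 2 - 1 := by omega
        simp [h0, h1]
      rw [PySem.List.enumerate_cons, PySem.List.enumerate_append]
      rw [PySem.List.enumerate_cons, PySem.List.enumerate_nil]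
      simp only [zero_add]
      rw [List.filter_cons, List.filter_append, List.filter_eq_self.mpr hmid]
      have hb : (1 : Int) + mid.length = ((a :: (mid ++ [b])).length : Int) - 1 := by
        simp; omega
      have hhead : (a :: (mid ++ [b])).headD 0 = a := rfl
      have hlast : (a :: (mid ++ [b])).getLastD 0 = b := by
        rw [show a :: (mid ++ [b]) = (a :: mid) ++ [b] from rfl]
        rw [List.getLastD_eq_getLast?, List.getLast?_append]
        simp
      rw [hhead, hlast]
      have hmap : (PySem.List.enumerate mid 1).map Prod.snd = mid := PySem.List.map_snd_enumerate mid 1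
      by_cases ha : a ≤ 0 <;> by_cases hbb : b ≤ 0 <;>
        simp [ha, hbb, hb, hmap, trimVal, List.sum_append] <;> omega

-- coupling of the two loops: B's state is exactly (running max of closed groups, summary of pending group)
theorem loop_couple (nums : List Int) : ∀ (gs : List (List Int)) (res : List Int),
    nums.foldl stepB (bestOf gs, summ res) =
      (bestOf (nums.foldl stepA (gs, res)).1, summ (nums.foldl stepA (gs, res)).2) := by
  induction nums with
  | nil => intro gs res; rfl
  | cons n t ih =>
    intro gs res
    simp only [List.foldl_cons]
    have hfirst : (if ((res.length : Int)) = 0 then n else res.headD 0) = (res ++ [n]).headD 0 := by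
      cases res with
      | nil => simp
      | cons a l => rw [if_neg (by simp; omega)]; simp
    have hlast : (res ++ [n]).getLastD 0 = n := by
      rw [List.getLastD_eq_getLast?, List.getLast?_append]
      simp
    have hsum : res.sum + n = (res ++ [n]).sum := by simp
    have hk : (res.length : Int) + 1 = ((res ++ [n]).length : Int) := by simp
    have hstepB : stepB (bestOf gs, summ res) n =
        if (res ++ [n]).sum < 0 then
          (bUpd (bestOf gs) (pyTrim (res ++ [n])).sum, summ ([] : List Int))
        else (bestOf gs, summ (res ++ [n])) := by
      simp only [stepB, summ, hfirst, hlast, hsum, hk, pyTrim_sum]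
      rfl
    have hstepA : stepA (gs, res) n =
        if (res ++ [n]).sum < 0 then (gs ++ [res ++ [n]], ([] : List Int)) else (gs, res ++ [n]) := rfl
    rw [hstepB, hstepA]
    by_cases hneg : (res ++ [n]).sum < 0
    · simp only [if_pos hneg]
      have hbo : bUpd (bestOf gs) (pyTrim (res ++ [n])).sum = bestOf (gs ++ [res ++ [n]]) := by
        simp [bestOf, List.foldl_append]
      rw [hbo, ih]
    · simp only [if_neg hneg]
      exact ih gs (res ++ [n])

-- the key value of max(lst, key=sum) is the running maximum of the sums
theorem max?_sum_eq (lst : List (List Int)) (m : List Int)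
    (h : PySem.List.max? lst (fun r => r.sum) = some m) :
    some m.sum = (lst.map List.sum).foldl bUpd none := by
  match lst with
  | [] =>
    rw [(PySem.List.max?_eq_none_iff [] (fun (r : List Int) => r.sum)).mpr rfl] at h
    cases h
  | x :: t =>
    simp only [List.map_cons, List.foldl_cons]
    show some m.sum = (t.map List.sum).foldl bUpd (bUpd none x.sum)
    rw [show bUpd none x.sum = some x.sum from rfl, foldl_bUpd_some]
    congr 1
    have hmem := PySem.List.max?_mem h
    have hmax := PySem.List.max?_isMax h
    have h1 : m.sum ≤ (t.map List.sum).foldl max x.sum := by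
      rcases List.mem_cons.mp hmem with he | hm
      · rw [he]; exact (PySem.List.le_foldl_max _ _).1
      · exact (PySem.List.le_foldl_max _ _).2 _ (List.mem_map_of_mem hm)
    have h2 : (t.map List.sum).foldl max x.sum ≤ m.sum := by
      rcases PySem.List.foldl_max_mem (t.map List.sum) x.sum with he | he
      · rw [he]; exact hmax x (by simp)
      · obtain ⟨y, hy, hye⟩ := List.mem_map.mp he
        rw [← hye]; exact hmax y (by simp [hy])
    omega

theorem bestOf_eq (gs : List (List Int)) :
    bestOf gs = ((gs.map pyTrim).map List.sum).foldl bUpd none := by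
  simp [bestOf, List.foldl_map, Function.comp]

-- ===== VERDICT (by name: the statement is the Claim_ definition above) =====
theorem max_sum_spec : Claim_equal_max_sum := by
  intro nums _
  unfold Spec_max_sum max_sum max_sum_alt
  simp only [PySem.List.foldl_append_singleton_eq_map, List.nil_append]
  set st := nums.foldl stepA (([] : List (List Int)), ([] : List Int)) with hst
  set sums := st.1 ++ [st.2] with hsums
  have hne : sums.map pyTrim ≠ [] := by simp [hsums]
  obtain ⟨m, hm⟩ : ∃ m, PySem.List.max? (sums.map pyTrim) (fun r => r.sum) = some m := by
    cases hmx : PySem.List.max? (sums.map pyTrim) (fun r => r.sum) with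
    | none => exact absurd ((PySem.List.max?_eq_none_iff _ _).mp hmx) hne
    | some m => exact ⟨m, rfl⟩
  have hB : nums.foldl stepB (none, 0, 0, 0, 0) = (bestOf st.1, summ st.2) := by
    have h0 : ((none, 0, 0, 0, 0) : Option Int × Int × Int × Int × Int) =
        (bestOf [], summ []) := rfl
    rw [h0, loop_couple nums [] []]
  rw [hm, hB]
  have hfin : bUpd (bestOf st.1) (trimVal (summ st.2).1 (summ st.2).2.1 (summ st.2).2.2.1 (summ st.2).2.2.2) =
      bestOf sums := by
    rw [show trimVal (summ st.2).1 (summ st.2).2.1 (summ st.2).2.2.1 (summ st.2).2.2.2 =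
        (pyTrim st.2).sum from (pyTrim_sum st.2).symm]
    simp [hsums, bestOf, List.foldl_append]
  have hval : bestOf sums = some m.sum := by
    rw [bestOf_eq, ← max?_sum_eq _ _ hm]
  simp only [hfin, hval]
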